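-- pv_equiv track=rewrite | github.com/MemoryForSky/Data-Structures-and-Algorithms | my_target_offer/61_continous_cards.py | is_continous
-- ===== SOURCE A (Python) =====
-- def is_continous(nums):
--     if not isinstance(nums, list) or len(nums) == 0:
--         return
--
--     nums.sort()
--
--     num_zero = 0
--     for i in range(len(nums)):
--         if nums[i] == 0:
--             num_zero += 1
--
--     small = num_zero
--     big = small + 1
--     num_gap = 0
--     while big < len(nums):
--         if nums[big] == nums[small]:
--             return False
--
--         num_gap += nums[big] - nums[small] - 1
--         small = big
--         big += 1
--
--     return True if num_gap <= num_zero else False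
-- ===== SOURCE B (Python) =====
-- def is_continous(nums):
--     if not isinstance(nums, list) or len(nums) == 0:
--         return
--
--     zeros = 0
--     seen = set()
--     lo = None
--     hi = None
--     for x in nums:
--         if x == 0:
--             zeros += 1
--         else:
--             if x in seen:
--                 return False
--             seen.add(x)
--             if lo is None or x < lo:
--                 lo = x
--             if hi is None or x > hi:
--                 hi = x
--
--     if lo is None:
--         return True
--     return hi - lo - (len(seen) - 1) <= zeros
-- ===== Notes on version B (the rewrite author's own statement) =====
-- stated objective: faster
-- what changed: Replaces sort-then-index-walk (sort, count zeros by index loop, while-loop over adjacent sorted pairs) with a single unsorted pass that counts jokers, detects duplicate non-zero cards with a set, and tracks min/max of the non-zeros, then checks max-min-(distinct-1) <= jokers.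
-- outside the precondition, e.g. on is_continous([-2, 0, 2]): A returns True, B returns False
import Mathlib
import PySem

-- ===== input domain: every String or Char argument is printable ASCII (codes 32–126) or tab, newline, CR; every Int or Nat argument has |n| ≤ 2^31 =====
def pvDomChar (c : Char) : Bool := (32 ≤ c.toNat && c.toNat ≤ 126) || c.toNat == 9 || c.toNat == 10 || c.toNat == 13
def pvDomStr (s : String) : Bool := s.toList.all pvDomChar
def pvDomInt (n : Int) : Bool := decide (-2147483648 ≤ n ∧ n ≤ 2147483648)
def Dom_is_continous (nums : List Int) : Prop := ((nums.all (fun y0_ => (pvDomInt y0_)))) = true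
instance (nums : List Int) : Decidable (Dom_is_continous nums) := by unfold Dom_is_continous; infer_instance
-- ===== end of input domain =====

-- B replaces A's sort + index walk by one unsorted pass (count jokers, set-detect duplicate
-- non-zeros, track min/max of non-zeros); objective: faster (asymptotic, O(n log n) → O(n)).
-- A sorts its argument in place (caller-observable mutation); B does not — the equivalence
-- proved here is about the RETURN value only.

-- ===== PORT A =====
-- the while-loop: small/big walk over the sorted list, accumulating num_gap;
-- returns none for Python's 'return False', some gap for falling out of the loop
def pvALoop (s : List Int) (small big : Nat) (gap : Int) : Option Int :=
  if _h : big < s.length then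
    if PySem.List.pyGetD s (big : Int) 0 = PySem.List.pyGetD s (small : Int) 0 then none
    else pvALoop s big (big + 1) (gap + (PySem.List.pyGetD s (big : Int) 0 - PySem.List.pyGetD s (small : Int) 0 - 1))
  else some gap
termination_by s.length - big

def is_continous (nums : List Int) : Option Bool :=
  if nums.length = 0 then none
  else
    let s := PySem.List.sorted nums (fun x => x) false
    let num_zero : Int := (PySem.List.pyRange 0 (PySem.List.len s)).foldl
        (fun acc i => if PySem.List.pyGetD s i 0 = 0 then acc + 1 else acc) 0
    match pvALoop s num_zero.toNat (num_zero.toNat + 1) 0 with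
    | none => some false
    | some num_gap => some (if num_gap ≤ num_zero then true else false)

-- ===== PORT B =====
-- one pass over the unsorted list: count zeros, duplicate non-zero ⇒ early False,
-- maintain lo = min nonzero, hi = max nonzero; none = Python's early 'return False'
def pvBLoop : List Int → Int → PySem.Set Int → Option Int → Option Int →
    Option (Int × PySem.Set Int × Option Int × Option Int)
  | [], zeros, seen, lo, hi => some (zeros, seen, lo, hi)
  | x :: xs, zeros, seen, lo, hi =>
    if x = 0 then pvBLoop xs (zeros + 1) seen lo hi
    else if PySem.Set.contains seen x then none
    else
      pvBLoop xs zeros (PySem.Set.add seen x)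
        (match lo with | none => some x | some l => if x < l then some x else some l)
        (match hi with | none => some x | some h => if h < x then some x else some h)

def is_continous_alt (nums : List Int) : Option Bool :=
  if nums.length = 0 then none
  else
    match pvBLoop nums 0 PySem.Set.empty none none with
    | none => some false
    | some (zeros, seen, lo, hi) =>
      match lo, hi with
      | some l, some h => some (decide (h - l - (PySem.Set.len seen - 1) ≤ zeros))
      | _, _ => some true

-- ===== PRECONDITION & SPEC =====
-- Pre_ excludes lists mixing a joker (0) with a negative card: there A's start index num_zero no
-- longer points at the first non-zero of the sorted list (zeros are not a prefix), an artefact of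
-- its indexing scheme outside the task's natural nonnegative-card domain.
def Pre_is_continous (nums : List Int) : Prop := 0 ∈ nums → ∀ x ∈ nums, 0 ≤ x
instance (nums : List Int) : Decidable (Pre_is_continous nums) := by unfold Pre_is_continous; infer_instance
def pvWitness_is_continous : List Int := [0, 1, 3]

def Spec_is_continous (nums : List Int) (out : Option Bool) : Prop := out = is_continous_alt nums
instance (nums : List Int) (out : Option Bool) : Decidable (Spec_is_continous nums out) := by unfold Spec_is_continous; infer_instance

-- ===== CLAIM (what is proved, stated in full; the proofs are below) =====
def Claim_equal_is_continous : Prop := ∀ (nums : List Int), Dom_is_continous nums → Pre_is_continous nums → Spec_is_continous nums (is_continous nums)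

-- ===== LEMMAS AND PROOFS =====

-- the adjacent-pair walk of pvALoop, as a pure function of the suffix of the sorted list
def chainA : List Int → Int → Option Int
  | x :: y :: rest, gap => if y = x then none else chainA (y :: rest) (gap + (y - x - 1))
  | _, gap => some gap

theorem pvALoop_eq_chainA (s : List Int) (small : Nat) (gap : Int) :
    pvALoop s small (small + 1) gap = chainA (s.drop small) gap := by
  by_cases h : small + 1 < s.length
  · have hsm : small < s.length := by omega
    rw [List.drop_eq_getElem_cons hsm, List.drop_eq_getElem_cons h]
    rw [pvALoop]
    simp only [h, dif_pos]
    rw [PySem.List.pyGetD_natCast, PySem.List.pyGetD_natCast]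
    rw [List.getD_eq_getElem s 0 h, List.getD_eq_getElem s 0 hsm]
    rw [chainA]
    by_cases he : s[small + 1] = s[small]
    · simp [he]
    · simp only [he, if_false]
      have := pvALoop_eq_chainA s (small + 1) (gap + (s[small+1] - s[small] - 1))
      rw [this, List.drop_eq_getElem_cons h]
  · rw [pvALoop]
    simp only [dif_neg (by omega : ¬ small + 1 < s.length)]
    -- drop small has length ≤ 1
    rcases Nat.lt_or_ge small s.length with hsm | hsm
    · rw [List.drop_eq_getElem_cons hsm]
      have : s.drop (small+1) = [] := List.drop_eq_nil_iff.mpr (by omega)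
      rw [this]; rfl
    · rw [List.drop_eq_nil_iff.mpr (by omega)]; rfl

theorem chainA_eval (t : List Int) : ∀ (x : Int) (gap : Int),
    (x :: t).Pairwise (· ≤ ·) →
    chainA (x :: t) gap =
      if (x :: t).Nodup then some (gap + (x :: t).getLast (by simp) - x - (t.length : Int)) else none := by
  induction t with
  | nil => intro x gap _; simp [chainA]
  | cons y r ih =>
    intro x gap hs
    have hxy : x ≤ y := (List.pairwise_cons.mp hs).1 y (by simp)
    have hyr : (y :: r).Pairwise (· ≤ ·) := (List.pairwise_cons.mp hs).2
    rw [chainA]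
    by_cases he : y = x
    · simp [he]
    · have hxlt : x < y := lt_of_le_of_ne hxy (fun h => he h.symm)
      have hnotin : x ∉ y :: r := by
        intro hm
        have : x = y ∨ x ∈ r := by simpa using hm
        rcases this with h | h
        · exact he h.symm
        · have := (List.pairwise_cons.mp hyr).1 x h
          omega
      have hnd : (x :: y :: r).Nodup ↔ (y :: r).Nodup := by
        constructor
        · exact fun h => (List.nodup_cons.mp h).2
        · exact fun h => List.nodup_cons.mpr ⟨hnotin, h⟩
      rw [if_neg he, ih y (gap + (y - x - 1)) hyr]
      by_cases hn : (y :: r).Nodup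
      · rw [if_pos hn, if_pos (hnd.mpr hn)]
        have hlast : (y :: r).getLast (by simp) = (x :: y :: r).getLast (by simp) := by
          simp [List.getLast_cons]
        rw [hlast]
        congr 1
        simp only [List.length_cons]
        push_cast
        linarith
      · rw [if_neg hn, if_neg (fun h => hn (hnd.mp h))]

theorem min?_snoc (p : List Int) (x : Int) :
    (match p.min? with | none => some x | some l => if x < l then some x else some l)
      = (p ++ [x]).min? := by
  induction p with
  | nil => simp
  | cons a q ih =>
    rw [List.min?_cons, List.cons_append, List.min?_cons]
    cases hq : q.min? with
    | none =>
      have : (q ++ [x]).min? = some x := by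
        rw [List.min?_eq_none_iff.mp hq]; simp
      simp only [hq] at ih
      rw [this]
      simp only [Option.elim]
      by_cases h : x < a <;> simp [h, min_def]
    | some l =>
      simp only [hq] at ih
      rw [← ih]
      simp only [Option.elim]
      by_cases h1 : x < l <;> by_cases h2 : x < a <;> by_cases h3 : a ≤ l <;> simp [h1, h2, h3, min_def] <;> omega

theorem max?_snoc (p : List Int) (x : Int) :
    (match p.max? with | none => some x | some h => if h < x then some x else some h)
      = (p ++ [x]).max? := by
  induction p with
  | nil => simp
  | cons a q ih =>
    rw [List.max?_cons, List.cons_append, List.max?_cons]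
    cases hq : q.max? with
    | none =>
      have : (q ++ [x]).max? = some x := by
        rw [List.max?_eq_none_iff.mp hq]; simp
      rw [this]
      simp only [Option.elim]
      by_cases h : a < x <;> simp [h, max_def] <;> omega
    | some l =>
      simp only [hq] at ih
      rw [← ih]
      simp only [Option.elim]
      by_cases h1 : l < x <;> by_cases h2 : a < x <;> by_cases h3 : a ≤ l <;> simp [h1, h2, h3, max_def] <;> omega

theorem pvBLoop_spec (l : List Int) : ∀ (p : List Int) (z : Int), p.Nodup →
    pvBLoop l z p p.min? p.max? =
      (if (p ++ l.filter (fun x => !(x == 0))).Nodup then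
        some (z + (l.count 0 : Int), p ++ l.filter (fun x => !(x == 0)),
              (p ++ l.filter (fun x => !(x == 0))).min?,
              (p ++ l.filter (fun x => !(x == 0))).max?)
       else none) := by
  induction l with
  | nil => intro p z hp; simp [pvBLoop, hp]
  | cons x xs ih =>
    intro p z hp
    rw [show pvBLoop (x :: xs) z p p.min? p.max? = (if x = 0 then pvBLoop xs (z + 1) p p.min? p.max? else if PySem.Set.contains p x then none else pvBLoop xs z (PySem.Set.add p x) (match p.min? with | none => some x | some l => if x < l then some x else some l) (match p.max? with | none => some x | some h => if h < x then some x else some h)) from rfl]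
    by_cases hx : x = 0
    · subst hx
      rw [if_pos rfl, ih p (z + 1) hp]
      simp only [List.filter_cons, List.count_cons]
      norm_num
      split_ifs
      · simp only [Option.some.injEq, Prod.mk.injEq]
        exact ⟨by ring, trivial⟩
      · rfl
    · rw [if_neg hx]
      by_cases hin : PySem.Set.contains p x
      · have hxp : x ∈ p := by simpa [PySem.Set.contains] using hin
        rw [if_pos hin]
        have : ¬ (p ++ (x :: xs).filter (fun y => !(y == 0))).Nodup := by
          intro hnd
          have hxf : x ∈ (x :: xs).filter (fun y => !(y == 0)) := by
            simp [hx]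
          exact (List.disjoint_of_nodup_append hnd) hxp hxf
        rw [if_neg this]
      · have hxp : x ∉ p := by simpa [PySem.Set.contains] using hin
        rw [if_neg hin]
        have hadd : PySem.Set.add p x = p ++ [x] := by
          simp [PySem.Set.add, PySem.Set.contains, hxp]
        rw [hadd, min?_snoc, max?_snoc, ih (p ++ [x]) z (by simp [List.nodup_append, hp]; intro a ha h; subst h; exact hxp ha)]
        have hfc : (x :: xs).filter (fun y => !(y == 0)) = x :: xs.filter (fun y => !(y == 0)) := by
          simp [hx]
        rw [hfc]
        have hcnt : (x :: xs).count 0 = xs.count 0 := by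
          simp [hx]
        rw [hcnt]
        simp only [List.append_assoc, List.singleton_append]

theorem sorted_decomp (nums : List Int) (h0 : 0 ∈ nums → ∀ x ∈ nums, 0 ≤ x) :
    PySem.List.sorted nums (fun x => x) false =
      List.replicate (nums.count 0) 0 ++
        PySem.List.sorted (nums.filter (fun x => !(x == 0))) (fun x => x) false := by
  apply PySem.List.sorted_id_eq_of_perm_of_pairwise
  · have h1 : (nums.filter (fun x => x == 0)).Perm (List.replicate (nums.count 0) 0) := by
      rw [List.filter_beq]
    have h2 : (PySem.List.sorted (nums.filter (fun x => !(x == 0))) (fun x => x) false).Perm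
        (nums.filter (fun x => !(x == 0))) := PySem.List.sorted_perm _ _ _
    exact (List.Perm.append h1.symm h2).trans (List.filter_append_perm _ nums)
  · rw [List.pairwise_append]
    refine ⟨?_, ?_, ?_⟩
    · exact List.pairwise_replicate.mpr (Or.inr le_rfl)
    · exact PySem.List.sorted_pairwise _ _
    · intro a ha b hb
      have : a = 0 := List.eq_of_mem_replicate ha
      subst this
      have hz : 0 ∈ nums := by
        have hne : nums.count 0 ≠ 0 := by
          intro h
          rw [h] at ha
          simp at ha
        exact List.count_pos_iff.mp (Nat.pos_of_ne_zero hne)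
      have hb' : b ∈ nums.filter (fun x => !(x == 0)) := by
        have := PySem.List.sorted_perm (nums.filter (fun x => !(x == 0))) (fun x => x) false
        exact this.mem_iff.mp hb
      exact h0 hz b (List.mem_of_mem_filter hb')

theorem le_getLast_of_pairwise : ∀ (l : List Int) (hne : l ≠ []),
    l.Pairwise (fun a b => a ≤ b) → ∀ b ∈ l, b ≤ l.getLast hne
  | [], hne, _, _, _ => absurd rfl hne
  | [x], _, _, b, hb => by
      simp at hb; simp [hb]
  | x :: y :: r, _, hpw, b, hb => by
      rw [List.getLast_cons (by simp)]
      rcases List.mem_cons.mp hb with rfl | hb'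
      · exact (List.pairwise_cons.mp hpw).1 _ (List.getLast_mem _)
      · exact le_getLast_of_pairwise (y :: r) (by simp) (List.pairwise_cons.mp hpw).2 b hb'

theorem is_continous_eq_alt (nums : List Int) (hpre : 0 ∈ nums → ∀ x ∈ nums, 0 ≤ x) :
    is_continous nums = is_continous_alt nums := by
  by_cases hnil : nums.length = 0
  · simp [is_continous, is_continous_alt, hnil]
  · have hdecomp := sorted_decomp nums hpre
    -- notation
    set g := nums.filter (fun x => !(x == 0)) with hg
    set t := PySem.List.sorted g (fun x => x) false with ht
    set z0 := nums.count 0 with hz0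
    set s := PySem.List.sorted nums (fun x => x) false with hs
    -- A's zero-counting loop computes z0
    have hfold : (PySem.List.pyRange 0 (PySem.List.len s)).foldl
        (fun acc i => if PySem.List.pyGetD s i 0 = 0 then acc + 1 else acc) 0 = (z0 : Int) := by
      have hfun : (fun (acc : Int) (x : Int) => if x = 0 then acc + 1 else acc)
          = (fun (acc : Int) (x : Int) => if (x == 0) = true then acc + 1 else acc) := by
        funext acc x; simp
      have h1 := PySem.List.foldl_pyRange_pyGetD s 0
        (fun (acc : Int) (x : Int) => if x = 0 then acc + 1 else acc) 0 (le_refl (0:Int))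
      have hlen : PySem.List.len s = ((s.length : Int)) := by simp [PySem.List.len]
      rw [hlen] at h1 ⊢
      rw [h1]
      simp only [Int.toNat_zero, List.drop_zero, hfun]
      rw [PySem.List.foldl_count_if (fun x => x == 0) s 0]
      have : s.countP (fun x => x == 0) = nums.countP (fun x => x == 0) :=
        (PySem.List.sorted_perm nums (fun x => x) false).countP_eq _
      rw [this, ← List.count_eq_countP, hz0]
      ring
    -- A's while loop
    have hdrop : s.drop z0 = t := by
      rw [hdecomp]
      exact List.drop_left' (by simp)
    have hA : is_continous nums =
        match chainA t 0 with
        | none => some false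
        | some num_gap => some (if num_gap ≤ (z0 : Int) then true else false) := by
      rw [is_continous, if_neg hnil]
      simp only [← hs, hfold, Int.toNat_natCast]
      rw [pvALoop_eq_chainA s z0 0, hdrop]
    -- B's loop
    have hB : is_continous_alt nums =
        (if g.Nodup then
          (match g.min?, g.max? with
            | some l, some h => some (decide (h - l - (PySem.Set.len g - 1) ≤ (0 : Int) + (z0 : Int)))
            | _, _ => some true)
         else some false) := by
      rw [is_continous_alt, if_neg hnil]
      have h2 := pvBLoop_spec nums [] 0 List.nodup_nil
      simp only [List.nil_append, List.min?_nil, List.max?_nil] at h2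
      rw [show (PySem.Set.empty : PySem.Set Int) = ([] : List Int) from rfl]
      rw [h2, ← hg, ← hz0]
      by_cases hnd : g.Nodup
      · rw [if_pos hnd, if_pos hnd]
      · rw [if_neg hnd, if_neg hnd]
    rw [hA, hB]
    have htperm : t.Perm g := PySem.List.sorted_perm g (fun x => x) false
    by_cases hnd : g.Nodup
    · rw [if_pos hnd]
      cases htt : t with
      | nil =>
        have hgnil : g = [] := (PySem.List.sorted_eq_nil_iff g (fun x => x) false).mp (ht.symm.trans htt)
        rw [hgnil]
        simp only [List.min?_nil, List.max?_nil, chainA]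
        have : (0 : Int) ≤ (z0 : Int) := by positivity
        simp [this]
      | cons m r =>
        have hpw : List.Pairwise (fun a b : Int => a ≤ b) (m :: r) := by
          have := PySem.List.sorted_pairwise g (fun x => x)
          rw [← ht, htt] at this
          exact this
        have htnd : (m :: r).Nodup := by
          rw [← htt]; exact htperm.nodup_iff.mpr hnd
        rw [htt] at htperm
        rw [chainA_eval r m 0 hpw, if_pos htnd]
        set L := (m :: r).getLast (by simp) with hL
        -- min and max of g
        have hmin : g.min? = some m := by
          rw [List.min?_eq_some_iff]
          constructor
          · exact htperm.mem_iff.mp (by simp)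
          · intro b hb
            exact PySem.List.key_head_sorted_le g (fun x => x) (by rw [← ht, htt]) b hb
        have hmax : g.max? = some L := by
          rw [List.max?_eq_some_iff]
          constructor
          · exact htperm.mem_iff.mp (List.getLast_mem _)
          · intro b hb
            exact le_getLast_of_pairwise (m :: r) (by simp) hpw b (htperm.mem_iff.mpr hb)
        rw [hmin, hmax]
        have hlen : PySem.Set.len g = ((r.length : Int) + 1) := by
          have : g.length = (m :: r).length := htperm.length_eq.symm
          simp [PySem.Set.len, this]
        rw [hlen]
        simp
    · rw [if_neg hnd]
      have htnd : ¬ t.Nodup := fun h => hnd (htperm.nodup_iff.mp h)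
      cases htt : t with
      | nil => rw [htt] at htnd; simp at htnd
      | cons m r =>
        have hpw : List.Pairwise (fun a b : Int => a ≤ b) (m :: r) := by
          have := PySem.List.sorted_pairwise g (fun x => x)
          rw [← ht, htt] at this
          exact this
        rw [chainA_eval r m 0 hpw, if_neg (by rw [← htt]; exact htnd)]

-- ===== VERDICT (by name: the statement is the Claim_ definition above) =====
theorem is_continous_spec : Claim_equal_is_continous := by
  intro nums _hdom hpre
  unfold Spec_is_continous
  exact is_continous_eq_alt nums hpre
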